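-- pv_equiv track=rewrite | github.com/Xodarap/ao3-stats | ao3_stats/scraper.py | _extract_stat_field
-- ===== SOURCE A (Python) =====
-- from typing import Dict, Iterable, List, Optional, Set, Tuple
--
-- def _extract_stat_field(class_names: Set[str]) -> Optional[str]:
--     for candidate in (
--         "kudos",
--         "words",
--         "chapters",
--         "collections",
--         "comments",
--         "bookmarks",
--         "hits",
--     ):
--         if candidate in class_names:
--             return candidate
--     return None
-- ===== SOURCE B (Python) =====
-- def _extract_stat_field(class_names):
--     priority = {
--         "kudos": 0,
--         "words": 1,
--         "chapters": 2,
--         "collections": 3,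
--         "comments": 4,
--         "bookmarks": 5,
--         "hits": 6,
--     }
--     found = [priority[name] for name in class_names if name in priority]
--     if not found:
--         return None
--     names = ("kudos", "words", "chapters", "collections", "comments", "bookmarks", "hits")
--     return names[min(found)]
-- ===== Notes on version B (the rewrite author's own statement) =====
-- stated objective: alternative
-- what changed: Replaces the ordered short-circuit scan over the seven candidate names with a single pass over the input set that collects priorities from a precomputed name->index table and returns the name of the minimum collected priority.
import Mathlib
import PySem

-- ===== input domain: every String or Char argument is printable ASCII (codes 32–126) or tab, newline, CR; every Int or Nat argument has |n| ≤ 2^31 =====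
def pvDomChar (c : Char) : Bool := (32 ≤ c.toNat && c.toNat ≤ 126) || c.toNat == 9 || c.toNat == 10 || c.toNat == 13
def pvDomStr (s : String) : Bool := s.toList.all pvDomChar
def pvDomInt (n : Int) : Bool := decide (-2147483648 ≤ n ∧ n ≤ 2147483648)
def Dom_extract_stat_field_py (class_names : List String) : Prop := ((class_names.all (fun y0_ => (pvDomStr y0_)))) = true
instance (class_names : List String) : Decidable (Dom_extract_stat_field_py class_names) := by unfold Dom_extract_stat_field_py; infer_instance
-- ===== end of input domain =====

-- B replaces A's ordered short-circuit scan over the candidates by one pass over the input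
-- set collecting priorities from an index table and a min-selection (objective: alternative).

-- ===== PORT A =====
-- the tuple of candidate stat names A iterates over
def pvCands : List String :=
  ["kudos", "words", "chapters", "collections", "comments", "bookmarks", "hits"]

-- the for-loop of A: return the first candidate that is a member of class_names
def pvFirstMatch : List String → List String → Option String
  | [], _ => none
  | c :: rest, cn => if c ∈ cn then some c else pvFirstMatch rest cn

def extract_stat_field_py (class_names : List String) : Option String :=
  pvFirstMatch pvCands class_names

-- ===== PORT B =====
-- the priority dict of Source B
def pvPriority : PySem.Dict String Int :=
  PySem.Dict.ofList
    [("kudos", 0), ("words", 1), ("chapters", 2), ("collections", 3),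
     ("comments", 4), ("bookmarks", 5), ("hits", 6)]

def extract_stat_field_py_alt (class_names : List String) : Option String :=
  -- found = [priority[name] for name in class_names if name in priority]
  let found := class_names.filterMap (fun name => pvPriority.get? name)
  -- if not found: return None; return names[min(found)]
  match PySem.List.min? found (fun x => x) with
  | none => none
  | some m => PySem.List.pyGet? pvCands m

-- ===== PRECONDITION & SPEC =====
def Spec_extract_stat_field_py (class_names : List String) (out : Option String) : Prop := out = extract_stat_field_py_alt class_names
instance (class_names : List String) (out : Option String) : Decidable (Spec_extract_stat_field_py class_names out) := by unfold Spec_extract_stat_field_py; infer_instance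

-- ===== CLAIM (what is proved, stated in full; the proofs are below) =====
def Claim_equal_extract_stat_field_py : Prop := ∀ (class_names : List String), Dom_extract_stat_field_py class_names → Spec_extract_stat_field_py class_names (extract_stat_field_py class_names)

-- ===== LEMMAS AND PROOFS =====

-- characterisation of a successful lookup in the literal priority dict
theorem pvPriority_get_char (name : String) (x : Int)
    (h : pvPriority.get? name = some x) :
    ∃ k : Nat, k < 7 ∧ name = pvCands.getD k "" ∧ x = (k : Int) := by
  have hd : pvPriority = PySem.Dict.mk
      [("kudos", 0), ("words", 1), ("chapters", 2), ("collections", 3),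
       ("comments", 4), ("bookmarks", 5), ("hits", 6)] := by decide
  rw [hd] at h
  simp only [PySem.Dict.get?_mk_cons] at h
  split_ifs at h with h0 h1 h2 h3 h4 h5 h6
  · exact ⟨0, by omega, by simp_all [pvCands], by simp_all⟩
  · exact ⟨1, by omega, by simp_all [pvCands], by simp_all⟩
  · exact ⟨2, by omega, by simp_all [pvCands], by simp_all⟩
  · exact ⟨3, by omega, by simp_all [pvCands], by simp_all⟩
  · exact ⟨4, by omega, by simp_all [pvCands], by simp_all⟩
  · exact ⟨5, by omega, by simp_all [pvCands], by simp_all⟩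
  · exact ⟨6, by omega, by simp_all [pvCands], by simp_all⟩
  · simp [PySem.Dict.get?] at h

theorem pvPriority_get_at (k : Nat) (hk : k < 7) :
    pvPriority.get? (pvCands.getD k "") = some (k : Int) := by
  interval_cases k <;> decide

theorem pvPyGet_cands (k : Nat) (hk : k < 7) :
    PySem.List.pyGet? pvCands (k : Int) = some (pvCands.getD k "") := by
  interval_cases k <;> decide

-- B's value when the first matching candidate has index j
theorem alt_eq_of_first (cn : List String) (j : Nat) (hj : j < 7)
    (hmem : pvCands.getD j "" ∈ cn)
    (hmin : ∀ i, i < j → pvCands.getD i "" ∉ cn) :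
    extract_stat_field_py_alt cn = some (pvCands.getD j "") := by
  unfold extract_stat_field_py_alt
  simp only []
  have hjf : (j : Int) ∈ cn.filterMap (fun name => pvPriority.get? name) :=
    List.mem_filterMap.2 ⟨_, hmem, pvPriority_get_at j hj⟩
  have hlow : ∀ x ∈ cn.filterMap (fun name => pvPriority.get? name), (j : Int) ≤ x := by
    intro x hx
    obtain ⟨name, hname, hget⟩ := List.mem_filterMap.1 hx
    obtain ⟨k, hk, hnk, hxk⟩ := pvPriority_get_char name x hget
    subst hnk hxk
    by_cases hkj : k < j
    · exact absurd hname (hmin k hkj)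
    · exact_mod_cast Nat.le_of_not_lt hkj
  rcases hm : PySem.List.min? (cn.filterMap (fun name => pvPriority.get? name)) (fun x => x)
      with _ | m
  · rw [PySem.List.min?_eq_none_iff] at hm
    rw [hm] at hjf; cases hjf
  · have h1 : (m : Int) ≤ (j : Int) := PySem.List.min?_isMin hm _ hjf
    have h2 : (j : Int) ≤ m := hlow m (PySem.List.min?_mem hm)
    have hmj : m = (j : Int) := le_antisymm h1 h2
    rw [hmj]
    exact pvPyGet_cands j hj

-- A's value when the first matching candidate has index j
theorem a_eq_of_first (cn : List String) (j : Nat) (hj : j < 7)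
    (hmem : pvCands.getD j "" ∈ cn)
    (hmin : ∀ i, i < j → pvCands.getD i "" ∉ cn) :
    extract_stat_field_py cn = some (pvCands.getD j "") := by
  have h0 := fun h => hmin 0 h
  have h1 := fun h => hmin 1 h
  have h2 := fun h => hmin 2 h
  have h3 := fun h => hmin 3 h
  have h4 := fun h => hmin 4 h
  have h5 := fun h => hmin 5 h
  interval_cases j <;>
    simp_all [extract_stat_field_py, pvFirstMatch, pvCands]

-- both sides are none when no candidate is present
theorem none_of_no_match (cn : List String)
    (h : ∀ i, i < 7 → pvCands.getD i "" ∉ cn) :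
    extract_stat_field_py cn = none ∧ extract_stat_field_py_alt cn = none := by
  constructor
  · have h0 := h 0 (by omega); have h1 := h 1 (by omega); have h2 := h 2 (by omega)
    have h3 := h 3 (by omega); have h4 := h 4 (by omega); have h5 := h 5 (by omega)
    have h6 := h 6 (by omega)
    simp_all [extract_stat_field_py, pvFirstMatch, pvCands]
  · unfold extract_stat_field_py_alt
    have hnil : cn.filterMap (fun name => pvPriority.get? name) = [] := by
      rw [List.filterMap_eq_nil_iff]
      intro name hname
      rcases hg : pvPriority.get? name with _ | x
      · rfl
      · obtain ⟨k, hk, hnk, _⟩ := pvPriority_get_char name x hg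
        exact absurd hname (hnk ▸ h k hk)
    rw [hnil]
    simp [PySem.List.min?]

-- ===== VERDICT (by name: the statement is the Claim_ definition above) =====
theorem extract_stat_field_py_spec : Claim_equal_extract_stat_field_py := by
  intro cn _
  unfold Spec_extract_stat_field_py
  by_cases m0 : pvCands.getD 0 "" ∈ cn
  · rw [a_eq_of_first cn 0 (by omega) m0 (by omega),
        alt_eq_of_first cn 0 (by omega) m0 (by omega)]
  by_cases m1 : pvCands.getD 1 "" ∈ cn
  · have hmin : ∀ i, i < 1 → pvCands.getD i "" ∉ cn := by
      intro i hi; interval_cases i; exact m0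
    rw [a_eq_of_first cn 1 (by omega) m1 hmin, alt_eq_of_first cn 1 (by omega) m1 hmin]
  by_cases m2 : pvCands.getD 2 "" ∈ cn
  · have hmin : ∀ i, i < 2 → pvCands.getD i "" ∉ cn := by
      intro i hi; interval_cases i; exacts [m0, m1]
    rw [a_eq_of_first cn 2 (by omega) m2 hmin, alt_eq_of_first cn 2 (by omega) m2 hmin]
  by_cases m3 : pvCands.getD 3 "" ∈ cn
  · have hmin : ∀ i, i < 3 → pvCands.getD i "" ∉ cn := by
      intro i hi; interval_cases i; exacts [m0, m1, m2]
    rw [a_eq_of_first cn 3 (by omega) m3 hmin, alt_eq_of_first cn 3 (by omega) m3 hmin]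
  by_cases m4 : pvCands.getD 4 "" ∈ cn
  · have hmin : ∀ i, i < 4 → pvCands.getD i "" ∉ cn := by
      intro i hi; interval_cases i; exacts [m0, m1, m2, m3]
    rw [a_eq_of_first cn 4 (by omega) m4 hmin, alt_eq_of_first cn 4 (by omega) m4 hmin]
  by_cases m5 : pvCands.getD 5 "" ∈ cn
  · have hmin : ∀ i, i < 5 → pvCands.getD i "" ∉ cn := by
      intro i hi; interval_cases i; exacts [m0, m1, m2, m3, m4]
    rw [a_eq_of_first cn 5 (by omega) m5 hmin, alt_eq_of_first cn 5 (by omega) m5 hmin]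
  by_cases m6 : pvCands.getD 6 "" ∈ cn
  · have hmin : ∀ i, i < 6 → pvCands.getD i "" ∉ cn := by
      intro i hi; interval_cases i; exacts [m0, m1, m2, m3, m4, m5]
    rw [a_eq_of_first cn 6 (by omega) m6 hmin, alt_eq_of_first cn 6 (by omega) m6 hmin]
  · have h : ∀ i, i < 7 → pvCands.getD i "" ∉ cn := by
      intro i hi; interval_cases i; exacts [m0, m1, m2, m3, m4, m5, m6]
    obtain ⟨ha, hb⟩ := none_of_no_match cn h
    rw [ha, hb]
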